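-- pv_equiv track=rewrite | github.com/dannfrd/skincare-analyzer-backend | main.py | _resolve_history_risk_level
-- ===== SOURCE A (Python) =====
-- def _resolve_history_risk_level(risk_levels_csv: str | None) -> str:
--     """Map ingredient risk distribution to UI-friendly badge values."""
--     if not risk_levels_csv:
--         return "safe"
--
--     normalized = [part.strip().lower() for part in str(risk_levels_csv).split(",") if part and part.strip()]
--     if any(level in {"high", "tinggi"} for level in normalized):
--         return "high"
--     if any(level in {"medium", "moderate", "sedang"} for level in normalized):
--         return "moderate"
--     if any(level in {"low", "rendah"} for level in normalized):
--         return "safe"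
--     return "safe"
-- ===== SOURCE B (Python) =====
-- _RANKS = {"high": 2, "tinggi": 2, "medium": 1, "moderate": 1, "sedang": 1}
-- _BADGES = ["safe", "moderate", "high"]
--
--
-- def _resolve_history_risk_level(risk_levels_csv):
--     """Map ingredient risk distribution to UI-friendly badge values."""
--     if not risk_levels_csv:
--         return "safe"
--     best = 0
--     for part in str(risk_levels_csv).split(","):
--         level = part.strip().lower()
--         if level:
--             best = max(best, _RANKS.get(level, 0))
--     return _BADGES[best]
-- ===== Notes on version B (the rewrite author's own statement) =====
-- stated objective: simpler
-- what changed: Replaces A's three sequential any-scans over the normalized parts (plus a redundant low/rendah scan) by a single pass that keeps a running maximum severity rank from a word->rank dict and finally indexes a badge table.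
import Mathlib
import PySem

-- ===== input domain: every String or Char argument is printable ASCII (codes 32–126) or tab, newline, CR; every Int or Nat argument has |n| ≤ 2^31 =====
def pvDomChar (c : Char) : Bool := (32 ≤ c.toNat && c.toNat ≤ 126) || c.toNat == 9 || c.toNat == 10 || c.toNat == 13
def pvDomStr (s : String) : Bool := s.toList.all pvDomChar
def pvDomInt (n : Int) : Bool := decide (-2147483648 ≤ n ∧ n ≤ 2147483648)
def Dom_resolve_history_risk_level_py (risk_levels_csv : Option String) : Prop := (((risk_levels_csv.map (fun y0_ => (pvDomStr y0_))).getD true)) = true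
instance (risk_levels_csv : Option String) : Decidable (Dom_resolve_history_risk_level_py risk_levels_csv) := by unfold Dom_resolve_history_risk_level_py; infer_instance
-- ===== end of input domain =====

-- B replaces A's three sequential any-scans over the normalized parts by one pass tracking
-- the maximum severity rank (dict lookup), then indexes a badge table (objective: simpler).

-- ===== PORT A =====
def resolve_history_risk_level_py (risk_levels_csv : Option String) : String :=
  match risk_levels_csv with
  | none => "safe"
  | some s =>
    if s == "" then "safe"
    else
      let normalized := ((PySem.Chars.splitOn s.toList ",".toList).filter
          (fun part => !(part == []) && !(PySem.Chars.strip part == []))).map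
          (fun part => PySem.Chars.lower (PySem.Chars.strip part))
      if normalized.any (fun level => level == "high".toList || level == "tinggi".toList) then "high"
      else if normalized.any (fun level => level == "medium".toList || level == "moderate".toList || level == "sedang".toList) then "moderate"
      else if normalized.any (fun level => level == "low".toList || level == "rendah".toList) then "safe"
      else "safe"

-- ===== PORT B =====
def pvRanks : PySem.Dict (List Char) Int :=
  PySem.Dict.ofList [("high".toList, 2), ("tinggi".toList, 2), ("medium".toList, 1), ("moderate".toList, 1), ("sedang".toList, 1)]

def pvBadges : List String := ["safe", "moderate", "high"]

def resolve_history_risk_level_py_alt (risk_levels_csv : Option String) : String :=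
  match risk_levels_csv with
  | none => "safe"
  | some s =>
    if s == "" then "safe"
    else
      let best := (PySem.Chars.splitOn s.toList ",".toList).foldl
        (fun best part =>
          let level := PySem.Chars.lower (PySem.Chars.strip part)
          if !(level == []) then max best (pvRanks.getD level 0) else best) 0
      PySem.List.pyGetD pvBadges best "safe"

-- ===== PRECONDITION & SPEC =====
def Spec_resolve_history_risk_level_py (risk_levels_csv : Option String) (out : String) : Prop := out = resolve_history_risk_level_py_alt risk_levels_csv
instance (risk_levels_csv : Option String) (out : String) : Decidable (Spec_resolve_history_risk_level_py risk_levels_csv out) := by unfold Spec_resolve_history_risk_level_py; infer_instance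

-- ===== CLAIM (what is proved, stated in full; the proofs are below) =====
def Claim_equal_resolve_history_risk_level_py : Prop := ∀ (risk_levels_csv : Option String), Dom_resolve_history_risk_level_py risk_levels_csv → Spec_resolve_history_risk_level_py risk_levels_csv (resolve_history_risk_level_py risk_levels_csv)

-- ===== LEMMAS AND PROOFS =====

-- rank of a (already normalized) level word
def pvRnk (q : List Char) : Int := pvRanks.getD q 0

lemma pvRnk_eq (q : List Char) : pvRnk q =
    if "high".toList = q then 2 else if "tinggi".toList = q then 2
    else if "medium".toList = q then 1 else if "moderate".toList = q then 1
    else if "sedang".toList = q then 1 else 0 := by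
  have h : pvRanks = PySem.Dict.mk [("high".toList, 2), ("tinggi".toList, 2),
      ("medium".toList, 1), ("moderate".toList, 1), ("sedang".toList, 1)] := by decide
  rw [pvRnk, h, PySem.Dict.getD_eq_get?_getD]
  simp only [PySem.Dict.get?_mk_cons, beq_iff_eq]
  split_ifs <;> rfl

lemma pvRnk_cases (q : List Char) : pvRnk q = 0 ∨ pvRnk q = 1 ∨ pvRnk q = 2 := by
  rw [pvRnk_eq]; split_ifs <;> norm_num

lemma pvRank2 (q : List Char) :
    (q == "high".toList || q == "tinggi".toList) = decide (pvRnk q = 2) := by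
  rw [pvRnk_eq]
  by_cases h1 : "high".toList = q
  · subst h1; decide
  by_cases h2 : "tinggi".toList = q
  · subst h2; decide
  by_cases h3 : "medium".toList = q
  · subst h3; decide
  by_cases h4 : "moderate".toList = q
  · subst h4; decide
  by_cases h5 : "sedang".toList = q
  · subst h5; decide
  rw [if_neg h1, if_neg h2, if_neg h3, if_neg h4, if_neg h5]
  simp
  exact ⟨fun h => h1 h.symm, fun h => h2 h.symm⟩

lemma pvRank1 (q : List Char) :
    (q == "medium".toList || q == "moderate".toList || q == "sedang".toList) = decide (pvRnk q = 1) := by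
  rw [pvRnk_eq]
  by_cases h1 : "high".toList = q
  · subst h1; decide
  by_cases h2 : "tinggi".toList = q
  · subst h2; decide
  by_cases h3 : "medium".toList = q
  · subst h3; decide
  by_cases h4 : "moderate".toList = q
  · subst h4; decide
  by_cases h5 : "sedang".toList = q
  · subst h5; decide
  rw [if_neg h1, if_neg h2, if_neg h3, if_neg h4, if_neg h5]
  simp
  exact ⟨⟨fun h => h3 h.symm, fun h => h4 h.symm⟩, fun h => h5 h.symm⟩

-- the normalized form of a part
def pvNorm (p : List Char) : List Char := PySem.Chars.lower (PySem.Chars.strip p)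

lemma pvNorm_of_pred_false (p : List Char)
    (h : (!(p == []) && !(PySem.Chars.strip p == [])) = false) : pvNorm p = [] := by
  simp only [Bool.and_eq_false_iff, Bool.not_eq_false', beq_iff_eq] at h
  rcases h with h | h
  · subst h; decide
  · simp only [pvNorm, h]; decide

-- core: the three-scan if-chain over ranks equals badge-indexing the running max
lemma pvMain (parts : List (List Char)) (b : Int) (hb : b = 0 ∨ b = 1 ∨ b = 2) :
    (if parts.any (fun p => decide (pvRnk (pvNorm p) = 2)) || decide (b = 2) then "high"
     else if parts.any (fun p => decide (pvRnk (pvNorm p) = 1)) || decide (b = 1) then "moderate"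
     else "safe")
    = PySem.List.pyGetD pvBadges
        (parts.foldl (fun best part =>
          let level := PySem.Chars.lower (PySem.Chars.strip part)
          if !(level == []) then max best (pvRanks.getD level 0) else best) b) "safe" := by
  induction parts generalizing b with
  | nil => rcases hb with h | h | h <;> subst h <;> decide
  | cons p ps ih =>
    simp only [List.foldl_cons]
    by_cases hE : (PySem.Chars.lower (PySem.Chars.strip p) == []) = true
    · have h0 : pvRnk (pvNorm p) = 0 := by
        have h' : pvNorm p = [] := by simpa [pvNorm] using hE
        rw [h']; decide
      have hacc : (if !(PySem.Chars.lower (PySem.Chars.strip p) == [])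
          then max b (pvRanks.getD (PySem.Chars.lower (PySem.Chars.strip p)) 0) else b) = b := by
        simp [hE]
      rw [hacc, ← ih b hb]
      simp only [List.any_cons, h0]
      rcases hb with h | h | h <;> subst h <;> simp
    · have hacc : (if !(PySem.Chars.lower (PySem.Chars.strip p) == [])
          then max b (pvRanks.getD (PySem.Chars.lower (PySem.Chars.strip p)) 0) else b)
          = max b (pvRnk (pvNorm p)) := by
        simp only [Bool.not_eq_true] at hE
        simp [hE, pvRnk, pvNorm]
      rw [hacc]
      simp only [List.any_cons]
      rcases pvRnk_cases (pvNorm p) with hr | hr | hr <;>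
        rcases hb with h | h | h <;> subst h <;>
          rw [← ih (max _ (pvRnk (pvNorm p))) (by rw [hr]; norm_num)] <;>
          simp [hr]

-- A's two decisive membership scans, rephrased through the rank table
lemma pvAny2 (l : List (List Char)) :
    (l.any (fun p => (!(p == []) && !(PySem.Chars.strip p == [])) &&
        (PySem.Chars.lower (PySem.Chars.strip p) == "high".toList ||
         PySem.Chars.lower (PySem.Chars.strip p) == "tinggi".toList)))
    = l.any (fun p => decide (pvRnk (pvNorm p) = 2)) := by
  apply PySem.List.any_congr_mem
  intro p _
  by_cases hp : (!(p == []) && !(PySem.Chars.strip p == [])) = true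
  · rw [hp, Bool.true_and]; exact pvRank2 (pvNorm p)
  · rw [Bool.not_eq_true] at hp
    have h2 : pvNorm p = [] := pvNorm_of_pred_false p hp
    rw [hp, Bool.false_and, h2]
    decide

lemma pvAny1 (l : List (List Char)) :
    (l.any (fun p => (!(p == []) && !(PySem.Chars.strip p == [])) &&
        (PySem.Chars.lower (PySem.Chars.strip p) == "medium".toList ||
         PySem.Chars.lower (PySem.Chars.strip p) == "moderate".toList ||
         PySem.Chars.lower (PySem.Chars.strip p) == "sedang".toList)))
    = l.any (fun p => decide (pvRnk (pvNorm p) = 1)) := by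
  apply PySem.List.any_congr_mem
  intro p _
  by_cases hp : (!(p == []) && !(PySem.Chars.strip p == [])) = true
  · rw [hp, Bool.true_and]; exact pvRank1 (pvNorm p)
  · rw [Bool.not_eq_true] at hp
    have h2 : pvNorm p = [] := pvNorm_of_pred_false p hp
    rw [hp, Bool.false_and, h2]
    decide

-- ===== VERDICT (by name: the statement is the Claim_ definition above) =====
theorem resolve_history_risk_level_py_spec : Claim_equal_resolve_history_risk_level_py := by
  intro csv _
  unfold Spec_resolve_history_risk_level_py resolve_history_risk_level_py resolve_history_risk_level_py_alt
  match csv with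
  | none => rfl
  | some s =>
    by_cases hs : (s == "") = true
    · simp [hs]
    · simp only [hs, Bool.false_eq_true, if_false]
      simp only [List.any_map, List.any_filter, Function.comp]
      rw [pvAny2, pvAny1, ← pvMain (PySem.Chars.splitOn s.toList ",".toList) 0 (Or.inl rfl)]
      have d2 : decide ((0 : Int) = 2) = false := by decide
      have d1 : decide ((0 : Int) = 1) = false := by decide
      rw [d2, d1, Bool.or_false, Bool.or_false, ite_self]
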